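-- pv_equiv track=rewrite | github.com/bengosney/Advent-Of-Code-2018 | src/day_05.py | part_1
-- ===== SOURCE A (Python) =====
-- def part_1(input: str) -> int:
--     polymer = []
--
--     for unit in [ord(i) for i in input]:
--         if polymer and abs(unit - polymer[-1]) == 32:
--             polymer.pop()
--         else:
--             polymer.append(unit)
--
--     return len(polymer)
-- ===== SOURCE B (Python) =====
-- def part_1(input: str) -> int:
--     units = [ord(c) for c in input]
--     while True:
--         for i in range(len(units) - 1):
--             if abs(units[i] - units[i + 1]) == 32:
--                 del units[i:i + 2]
--                 break
--         else:
--             return len(units)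
-- ===== Notes on version B (the rewrite author's own statement) =====
-- stated objective: alternative
-- what changed: Replaces the single-pass stack with a repeated-scan fixpoint that removes the leftmost adjacent reacting pair and rescans until none remains, then returns the remaining length.
import Mathlib
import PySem

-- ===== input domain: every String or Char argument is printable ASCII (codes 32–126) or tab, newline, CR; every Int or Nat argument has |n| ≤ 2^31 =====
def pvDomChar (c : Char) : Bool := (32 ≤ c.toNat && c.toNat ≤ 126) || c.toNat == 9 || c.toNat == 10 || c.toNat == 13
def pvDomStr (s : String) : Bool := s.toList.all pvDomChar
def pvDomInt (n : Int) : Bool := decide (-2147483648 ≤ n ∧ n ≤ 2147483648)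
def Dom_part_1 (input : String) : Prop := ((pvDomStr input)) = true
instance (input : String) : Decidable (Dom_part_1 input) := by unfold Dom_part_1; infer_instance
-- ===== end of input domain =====

-- B replaces A's single-pass stack with a repeated-scan fixpoint removing the leftmost
-- reacting adjacent pair until none remains (alternative decomposition, not faster).

-- ===== PORT A =====
-- A's loop body: polymer kept with its top at the END (Python append/pop/[-1]).
def pvStepA (p : List Int) (u : Int) : List Int :=
  match p.getLast? with
  | some t => if (u - t).natAbs = 32 then p.dropLast else p ++ [u]
  | none => p ++ [u]

def part_1 (input : String) : Int :=
  let units := input.toList.map (fun c => (c.toNat : Int))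
  let polymer := units.foldl pvStepA []
  (polymer.length : Int)

-- ===== PORT B =====
-- scan for the first adjacent pair with |a-b| = 32; remove it (Python's inner for/del/break)
def pvReduce1 : List Int → Option (List Int)
  | a :: b :: t => if (a - b).natAbs = 32 then some t else (pvReduce1 (b :: t)).map (a :: ·)
  | _ => none

-- Python's `while True` rescan loop; fuel bounds the number of removals
def pvLoopB : Nat → List Int → Int
  | 0, w => (w.length : Int)
  | n + 1, w =>
    match pvReduce1 w with
    | some w' => pvLoopB n w'
    | none => (w.length : Int)

def part_1_alt (input : String) : Int :=
  let units := input.toList.map (fun c => (c.toNat : Int))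
  pvLoopB units.length units

-- ===== PRECONDITION & SPEC =====
def Spec_part_1 (input : String) (out : Int) : Prop := out = part_1_alt input
instance (input : String) (out : Int) : Decidable (Spec_part_1 input out) := by unfold Spec_part_1; infer_instance

-- ===== CLAIM (what is proved, stated in full; the proofs are below) =====
def Claim_equal_part_1 : Prop := ∀ (input : String), Dom_part_1 input → Spec_part_1 input (part_1 input)

-- ===== LEMMAS AND PROOFS =====

-- front-stack version of A's step, used by the proofs
def pvStepF (p : List Int) (u : Int) : List Int :=
  match p with
  | t :: p' => if (u - t).natAbs = 32 then p' else u :: p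
  | [] => [u]

theorem pvStepA_rev (q : List Int) (u : Int) :
    pvStepA q.reverse u = (pvStepF q u).reverse := by
  cases q with
  | nil => simp [pvStepA, pvStepF]
  | cons t q' =>
    simp only [pvStepA, pvStepF, List.reverse_cons, List.getLast?_concat,
      List.dropLast_concat]
    split <;> simp

theorem pvFoldA_rev (w : List Int) : ∀ q : List Int,
    w.foldl pvStepA q.reverse = (w.foldl pvStepF q).reverse := by
  induction w with
  | nil => intro q; simp
  | cons a w ih =>
    intro q
    simp only [List.foldl_cons, pvStepA_rev]
    exact ih (pvStepF q a)

-- side condition: the stack top does not react with the first character of the word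
def pvOk (p w : List Int) : Prop :=
  ∀ x h, p.head? = some x → w.head? = some h → (h - x).natAbs ≠ 32

theorem pvOk_nil (w : List Int) : pvOk [] w := by
  intro x h hx _; simp at hx

theorem pvStepF_push (p : List Int) (a : Int) (w : List Int)
    (hok : pvOk p (a :: w)) : pvStepF p a = a :: p := by
  cases p with
  | nil => rfl
  | cons t p' =>
    have := hok t a rfl rfl
    simp [pvStepF, this]

theorem pvReduce1_some (w : List Int) : ∀ w' p, pvReduce1 w = some w' → pvOk p w →
    w.foldl pvStepF p = w'.foldl pvStepF p := by
  induction w with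
  | nil => intro w' p h; simp [pvReduce1] at h
  | cons a w ih =>
    intro w' p h hok
    cases w with
    | nil => simp [pvReduce1] at h
    | cons b t =>
      by_cases hab : (a - b).natAbs = 32
      · simp only [pvReduce1, if_pos hab] at h
        injection h with h; subst h
        simp only [List.foldl_cons, pvStepF_push p a _ hok]
        have hba : (b - a).natAbs = 32 := by omega
        simp [pvStepF, hba]
      · simp only [pvReduce1, if_neg hab, Option.map_eq_some_iff] at h
        obtain ⟨w2, hw2, rfl⟩ := h
        simp only [List.foldl_cons, pvStepF_push p a _ hok]
        exact ih w2 (a :: p) hw2 (by intro x h hx hh; simp at hx hh; omega)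

theorem pvReduce1_none (w : List Int) : ∀ p, pvReduce1 w = none → pvOk p w →
    w.foldl pvStepF p = w.reverse ++ p := by
  induction w with
  | nil => intro p _ _; simp
  | cons a w ih =>
    intro p h hok
    simp only [List.foldl_cons, pvStepF_push p a _ hok]
    cases w with
    | nil => simp
    | cons b t =>
      by_cases hab : (a - b).natAbs = 32
      · simp [pvReduce1, hab] at h
      · simp only [pvReduce1, if_neg hab, Option.map_eq_none_iff] at h
        rw [ih (a :: p) h (by intro x h' hx hh; simp at hx hh; omega)]
        simp

theorem pvReduce1_length (w : List Int) : ∀ w', pvReduce1 w = some w' →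
    w'.length + 2 = w.length := by
  induction w with
  | nil => intro w' h; simp [pvReduce1] at h
  | cons a w ih =>
    intro w' h
    cases w with
    | nil => simp [pvReduce1] at h
    | cons b t =>
      by_cases hab : (a - b).natAbs = 32
      · simp only [pvReduce1, if_pos hab, Option.some.injEq] at h
        subst h; simp
      · simp only [pvReduce1, if_neg hab, Option.map_eq_some_iff] at h
        obtain ⟨w2, hw2, rfl⟩ := h
        have := ih w2 hw2
        simp at this ⊢; omega

theorem pvMain (n : Nat) : ∀ w : List Int, w.length ≤ 2 * n →
    ((w.foldl pvStepF []).length : Int) = pvLoopB n w := by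
  induction n with
  | zero =>
    intro w hw
    have : w = [] := by
      cases w with
      | nil => rfl
      | cons a t => simp at hw
    subst this; rfl
  | succ n ih =>
    intro w hw
    cases hr : pvReduce1 w with
    | none =>
      rw [pvReduce1_none w [] hr (pvOk_nil w)]
      simp [pvLoopB, hr]
    | some w' =>
      rw [pvReduce1_some w w' [] hr (pvOk_nil w)]
      have hl := pvReduce1_length w w' hr
      simp only [pvLoopB, hr]
      exact ih w' (by omega)

-- ===== VERDICT (by name: the statement is the Claim_ definition above) =====
theorem part_1_spec : Claim_equal_part_1 := by
  intro input _
  unfold Spec_part_1 part_1 part_1_alt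
  set units := input.toList.map (fun c => (c.toNat : Int)) with hu
  have hrev : units.foldl pvStepA [] = (units.foldl pvStepF []).reverse := by
    have := pvFoldA_rev units []
    simpa using this
  simp only [hrev, List.length_reverse]
  exact pvMain units.length units (by omega)
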